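-- pv_equiv track=rewrite | github.com/Dayacha/Innovation-Policy | reforms/panel_builder.py | _has_complete_event_coverage
-- ===== SOURCE A (Python) =====
-- def _has_complete_event_coverage(result, expected_n: int) -> bool:
--     """Return True when a parsed cross-dedup result covers all indices exactly once."""
--     if not result or "events" not in result or not isinstance(result["events"], list):
--         return False
--     seen = []
--     for ev in result["events"]:
--         if not isinstance(ev, dict):
--             return False
--         indices = ev.get("indices", [])
--         if not isinstance(indices, list):
--             return False
--         for idx in indices:
--             if not isinstance(idx, int):
--                 return False
--             if idx < 0 or idx >= expected_n:
--                 return False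
--             seen.append(idx)
--     return len(seen) == expected_n and set(seen) == set(range(expected_n))
-- ===== SOURCE B (Python) =====
-- def _has_complete_event_coverage(result, expected_n: int) -> bool:
--     """Return True when a parsed cross-dedup result covers all indices exactly once."""
--     if not result or "events" not in result or not isinstance(result["events"], list):
--         return False
--     events = result["events"]
--     if any(not isinstance(ev, dict) for ev in events):
--         return False
--     index_lists = [ev.get("indices", []) for ev in events]
--     if any(not isinstance(ix, list) for ix in index_lists):
--         return False
--     flat = [i for ix in index_lists for i in ix]
--     if any(not isinstance(i, int) for i in flat):
--         return False
--     return len(flat) == expected_n and sorted(flat) == list(range(expected_n))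
-- ===== Notes on version B (the rewrite author's own statement) =====
-- stated objective: alternative
-- what changed: B validates in staged whole-list passes, flattens all index lists, and decides coverage by sorting the flat list and comparing it to list(range(expected_n)); it has no per-index range guard and no set construction, unlike A's single interleaved loop with range checks plus a final set(seen)==set(range(n)) comparison.
import Mathlib
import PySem

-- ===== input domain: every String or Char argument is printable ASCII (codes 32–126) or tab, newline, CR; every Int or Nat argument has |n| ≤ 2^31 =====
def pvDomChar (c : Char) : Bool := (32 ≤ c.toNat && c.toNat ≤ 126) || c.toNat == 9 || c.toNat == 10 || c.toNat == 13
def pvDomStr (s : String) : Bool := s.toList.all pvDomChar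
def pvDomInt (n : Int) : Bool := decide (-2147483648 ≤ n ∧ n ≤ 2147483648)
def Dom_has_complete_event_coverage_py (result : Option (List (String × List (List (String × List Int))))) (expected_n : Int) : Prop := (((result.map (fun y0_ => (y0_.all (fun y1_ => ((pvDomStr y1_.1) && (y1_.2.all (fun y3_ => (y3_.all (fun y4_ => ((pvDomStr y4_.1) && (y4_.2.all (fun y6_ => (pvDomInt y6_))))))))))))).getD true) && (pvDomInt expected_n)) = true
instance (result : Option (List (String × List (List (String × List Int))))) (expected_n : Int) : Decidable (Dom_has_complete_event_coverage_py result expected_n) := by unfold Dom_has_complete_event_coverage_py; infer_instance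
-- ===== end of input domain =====

-- B replaces A's interleaved per-index range guard, seen list and final
-- set(seen)==set(range(n)) comparison by staged passes: flatten all index lists,
-- then compare len(flat)==expected_n and sorted(flat)==list(range(expected_n))
-- (objective: alternative). Under the type convention the Python isinstance
-- guards are vacuously true and the dicts are association lists (first-match lookup).

-- ===== PORT A =====
-- first-match lookup on an association list (Python dict access / `in` / .get)
def pvLookup {β : Type} (d : List (String × β)) (k : String) : Option β :=
  (d.find? (fun p => p.1 == k)).map (·.2)

-- inner loop of A: `for idx in indices: … seen.append(idx)` (early False = none)
def pvSeenIdx (idxs : List Int) (seen : List Int) (n : Int) : Option (List Int) :=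
  match idxs with
  | [] => some seen
  | i :: rest => if i < 0 ∨ n ≤ i then none else pvSeenIdx rest (seen ++ [i]) n

-- outer loop of A over result["events"]
def pvSeenEv (events : List (List (String × List Int))) (seen : List Int) (n : Int) :
    Option (List Int) :=
  match events with
  | [] => some seen
  | ev :: rest =>
    match pvSeenIdx ((pvLookup ev "indices").getD []) seen n with
    | none => none
    | some s => pvSeenEv rest s n

def has_complete_event_coverage_py (result : Option (List (String × List (List (String × List Int))))) (expected_n : Int) : Bool :=
  match result with
  | none => false                      -- `not result`: None is falsy
  | some d =>
    if d.isEmpty then false            -- `not result`: empty dict is falsy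
    else
      match pvLookup d "events" with
      | none => false                  -- `"events" not in result`
      | some events =>
        match pvSeenEv events [] expected_n with
        | none => false
        | some seen =>
          ((seen.length : Int) == expected_n) &&
            PySem.Set.equal (PySem.Set.ofList seen)
              (PySem.Set.ofList (PySem.List.pyRange 0 expected_n 1))

-- ===== PORT B =====
def has_complete_event_coverage_py_alt (result : Option (List (String × List (List (String × List Int))))) (expected_n : Int) : Bool :=
  match result with
  | none => false
  | some d =>
    if d.isEmpty then false
    else
      match pvLookup d "events" with
      | none => false
      | some events =>
        -- index_lists = [ev.get("indices", []) for ev in events]; flat = flattened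
        let flat := (events.map (fun ev => (pvLookup ev "indices").getD [])).flatten
        -- len(flat) == expected_n and sorted(flat) == list(range(expected_n))
        ((flat.length : Int) == expected_n) &&
          (PySem.List.sorted flat (fun x => x) false == PySem.List.pyRange 0 expected_n 1)

-- ===== PRECONDITION & SPEC =====
def Spec_has_complete_event_coverage_py (result : Option (List (String × List (List (String × List Int))))) (expected_n : Int) (out : Bool) : Prop := out = has_complete_event_coverage_py_alt result expected_n
instance (result : Option (List (String × List (List (String × List Int))))) (expected_n : Int) (out : Bool) : Decidable (Spec_has_complete_event_coverage_py result expected_n out) := by unfold Spec_has_complete_event_coverage_py; infer_instance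

-- ===== CLAIM (what is proved, stated in full; the proofs are below) =====
def Claim_equal_has_complete_event_coverage_py : Prop := ∀ (result : Option (List (String × List (List (String × List Int))))) (expected_n : Int), Dom_has_complete_event_coverage_py result expected_n → Spec_has_complete_event_coverage_py result expected_n (has_complete_event_coverage_py result expected_n)

-- ===== LEMMAS AND PROOFS =====

-- A's inner loop appends the whole index list iff every index is in range
theorem pvSeenIdx_eq (idxs seen : List Int) (n : Int) :
    pvSeenIdx idxs seen n =
      if idxs.all (fun i => decide (0 ≤ i) && decide (i < n)) then some (seen ++ idxs)
      else none := by
  induction idxs generalizing seen with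
  | nil => simp [pvSeenIdx]
  | cons i rest ih =>
    simp only [pvSeenIdx, List.all_cons]
    by_cases h : i < 0 ∨ n ≤ i
    · have : ¬ (0 ≤ i ∧ i < n) := by omega
      simp [h, this]
    · have h0 : 0 ≤ i := by omega
      have h1 : i < n := by omega
      simp [h, h0, h1, ih]

-- the concatenated index stream of a list of events (what B calls `flat`)
def pvStream (events : List (List (String × List Int))) : List Int :=
  events.flatMap (fun ev => (pvLookup ev "indices").getD [])

-- A's outer loop appends the whole stream iff every index of the stream is in range
theorem pvSeenEv_eq (events : List (List (String × List Int))) (seen : List Int) (n : Int) :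
    pvSeenEv events seen n =
      if (pvStream events).all (fun i => decide (0 ≤ i) && decide (i < n)) then
        some (seen ++ pvStream events)
      else none := by
  induction events generalizing seen with
  | nil => simp [pvSeenEv, pvStream]
  | cons ev rest ih =>
    simp only [pvSeenEv, pvSeenIdx_eq, pvStream, List.flatMap_cons, List.all_append]
    by_cases h : ((pvLookup ev "indices").getD []).all (fun i => decide (0 ≤ i) && decide (i < n))
    · simp [h, ih, pvStream]
    · simp [h]

-- for an in-range stream of length n: A's set comparison equals B's sorted comparison
theorem pvFinal (stream : List Int) (n : Int)
    (hall : stream.all (fun i => decide (0 ≤ i) && decide (i < n)) = true)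
    (hlen : (stream.length : Int) = n) :
    PySem.Set.equal (PySem.Set.ofList stream)
        (PySem.Set.ofList (PySem.List.pyRange 0 n 1)) =
      (PySem.List.sorted stream (fun x => x) false == PySem.List.pyRange 0 n 1) := by
  have hmem : ∀ i ∈ stream, 0 ≤ i ∧ i < n := by
    intro i hi
    have := List.all_eq_true.mp hall i hi
    simpa using this
  have hlenN : stream.length = n.toNat := by omega
  have hrlen : (PySem.List.pyRange 0 n 1).length = n.toNat := by
    simp [PySem.List.length_pyRange_one]
  cases he : PySem.Set.equal (PySem.Set.ofList stream)
      (PySem.Set.ofList (PySem.List.pyRange 0 n 1)) with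
  | true =>
    have hiff := (PySem.Set.equal_iff _ _).mp he
    have hmemiff : ∀ x, x ∈ stream ↔ x ∈ PySem.List.pyRange 0 n 1 := by
      intro x
      have := hiff x
      simpa only [PySem.Set.mem_ofList] using this
    -- same members + equal lengths + in-range ⟹ nodup ⟹ permutation
    have hnd : stream.Nodup := by
      by_contra hnd
      have hcardlt : stream.toFinset.card < stream.length := by
        have hsubl : stream.dedup.Sublist stream := stream.dedup_sublist
        have hle : stream.dedup.length ≤ stream.length := hsubl.length_le
        have hne : stream.dedup.length ≠ stream.length := by
          intro heq
          exact hnd (hsubl.eq_of_length heq ▸ stream.nodup_dedup)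
        have hcd : stream.toFinset.card = stream.dedup.length := by
          rw [← List.toFinset_card_of_nodup stream.nodup_dedup]
          congr 1
          ext x
          simp [List.mem_toFinset, List.mem_dedup]
        omega
      have hfs : stream.toFinset = (PySem.List.pyRange 0 n 1).toFinset := by
        ext x
        rw [List.mem_toFinset, List.mem_toFinset]
        exact hmemiff x
      have : stream.toFinset.card = n.toNat := by
        rw [hfs, List.toFinset_card_of_nodup (PySem.List.nodup_pyRange_one 0 n), hrlen]
      omega
    have hperm : (PySem.List.pyRange 0 n 1).Perm stream := by
      rw [List.perm_ext_iff_of_nodup (PySem.List.nodup_pyRange_one 0 n) hnd]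
      intro x
      exact (hmemiff x).symm
    have := PySem.List.sorted_eq_of_perm_of_pairwise_lt stream (PySem.List.pyRange 0 n 1)
      (fun x => x) hperm (by simpa using PySem.List.pairwise_lt_pyRange_one 0 n)
    simp [this]
  | false =>
    cases hs : (PySem.List.sorted stream (fun x => x) false == PySem.List.pyRange 0 n 1) with
    | false => rfl
    | true =>
      exfalso
      have hseq : PySem.List.sorted stream (fun x => x) false = PySem.List.pyRange 0 n 1 :=
        by simpa using hs
      have hperm : stream.Perm (PySem.List.pyRange 0 n 1) := by
        have := PySem.List.sorted_perm stream (fun x => x) false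
        rw [hseq] at this
        exact this.symm
      have : PySem.Set.equal (PySem.Set.ofList stream)
          (PySem.Set.ofList (PySem.List.pyRange 0 n 1)) = true := by
        rw [PySem.Set.equal_iff]
        intro x
        simp only [PySem.Set.mem_ofList]
        exact ⟨fun h => hperm.mem_iff.mp h, fun h => hperm.mem_iff.mpr h⟩
      rw [this] at he
      cases he

-- an out-of-range index makes B's sorted comparison false
theorem pvSortedNe (stream : List Int) (n : Int)
    (hall : stream.all (fun i => decide (0 ≤ i) && decide (i < n)) ≠ true) :
    (PySem.List.sorted stream (fun x => x) false == PySem.List.pyRange 0 n 1) = false := by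
  cases hs : (PySem.List.sorted stream (fun x => x) false == PySem.List.pyRange 0 n 1) with
  | false => rfl
  | true =>
    exfalso
    apply hall
    rw [List.all_eq_true]
    intro i hi
    have hseq : PySem.List.sorted stream (fun x => x) false = PySem.List.pyRange 0 n 1 :=
      by simpa using hs
    have : i ∈ PySem.List.sorted stream (fun x => x) false :=
      (PySem.List.mem_sorted stream (fun x => x) false i).mpr hi
    rw [hseq, PySem.List.mem_pyRange_one] at this
    simp only [Bool.and_eq_true, decide_eq_true_eq]
    omega

-- ===== VERDICT (by name: the statement is the Claim_ definition above) =====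
theorem has_complete_event_coverage_py_spec : Claim_equal_has_complete_event_coverage_py := by
  intro result expected_n _
  unfold Spec_has_complete_event_coverage_py
  unfold has_complete_event_coverage_py has_complete_event_coverage_py_alt
  cases result with
  | none => rfl
  | some d =>
    by_cases hd : d.isEmpty
    · simp [hd]
    · simp only [hd, Bool.false_eq_true, if_false]
      cases hev : pvLookup d "events" with
      | none => rfl
      | some events =>
        have hA := pvSeenEv_eq events [] expected_n
        simp only [List.nil_append] at hA
        have hflat : (events.map (fun ev => (pvLookup ev "indices").getD [])).flatten
            = pvStream events := by
          simp [pvStream, List.flatMap_def]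
        change (match pvSeenEv events [] expected_n with
            | none => false
            | some seen => ((seen.length : Int) == expected_n) &&
                PySem.Set.equal (PySem.Set.ofList seen)
                  (PySem.Set.ofList (PySem.List.pyRange 0 expected_n 1))) =
          ((((events.map (fun ev => (pvLookup ev "indices").getD [])).flatten.length : Int)
              == expected_n) &&
            (PySem.List.sorted (events.map (fun ev => (pvLookup ev "indices").getD [])).flatten
                (fun x => x) false == PySem.List.pyRange 0 expected_n 1))
        rw [hflat]
        by_cases hall : ((pvStream events).all
            fun i => decide (0 ≤ i) && decide (i < expected_n)) = true
        · rw [if_pos hall] at hA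
          rw [hA]
          show ((((pvStream events).length : Int) == expected_n) && _) = _
          by_cases hlen : ((pvStream events).length : Int) = expected_n
          · rw [pvFinal _ _ hall hlen]
          · have hb : (((pvStream events).length : Int) == expected_n) = false := by
              simp [hlen]
            rw [hb, Bool.false_and, Bool.false_and]
        · rw [if_neg hall] at hA
          rw [hA, pvSortedNe _ _ hall, Bool.and_false]
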